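-- pv_equiv track=rewrite | github.com/Mostafa96-cybersecurity/Asset-ProjectV2 | enhanced_collection_strategy.py | _is_local_network
-- ===== SOURCE A (Python) =====
-- def _is_local_network(ip: str) -> bool:
--     """Check if IP is in local network range"""
--     try:
--         import ipaddress
--
--         ip_obj = ipaddress.IPv4Address(ip)
--
--         # Common local network ranges
--         local_networks = [
--             ipaddress.IPv4Network('192.168.0.0/16'),
--             ipaddress.IPv4Network('10.0.0.0/8'),
--             ipaddress.IPv4Network('172.16.0.0/12'),
--             ipaddress.IPv4Network('169.254.0.0/16'),  # Link-local
--             ipaddress.IPv4Network('127.0.0.0/8'),     # Loopback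
--         ]
--
--         return any(ip_obj in network for network in local_networks)
--
--     except Exception:
--         return False
-- ===== SOURCE B (Python) =====
-- def _is_local_network(ip: str) -> bool:
--     """Check if IP is in local network range (hand parse + bit-mask prefix tests)."""
--     parts = ip.split('.')
--     if len(parts) != 4:
--         return False
--     n = 0
--     for p in parts:
--         if not (p.isascii() and p.isdigit()):
--             return False
--         if len(p) > 3 or (p != '0' and p[0] == '0'):
--             return False
--         v = int(p)
--         if v > 255:
--             return False
--         n = n * 256 + v
--     return ((n & 0xFFFF0000) == 0xC0A80000      # 192.168.0.0/16
--             or (n >> 24) == 10                  # 10.0.0.0/8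
--             or (n & 0xFFF00000) == 0xAC100000   # 172.16.0.0/12
--             or (n & 0xFFFF0000) == 0xA9FE0000   # 169.254.0.0/16
--             or (n >> 24) == 127)                # 127.0.0.0/8
-- ===== Notes on version B (the rewrite author's own statement) =====
-- stated objective: alternative
-- what changed: B replaces IPv4Address/IPv4Network object construction and the any()-scan over five network objects with a hand-rolled dotted-quad parse into one integer followed by an OR of bit-mask prefix tests.
import Mathlib
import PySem

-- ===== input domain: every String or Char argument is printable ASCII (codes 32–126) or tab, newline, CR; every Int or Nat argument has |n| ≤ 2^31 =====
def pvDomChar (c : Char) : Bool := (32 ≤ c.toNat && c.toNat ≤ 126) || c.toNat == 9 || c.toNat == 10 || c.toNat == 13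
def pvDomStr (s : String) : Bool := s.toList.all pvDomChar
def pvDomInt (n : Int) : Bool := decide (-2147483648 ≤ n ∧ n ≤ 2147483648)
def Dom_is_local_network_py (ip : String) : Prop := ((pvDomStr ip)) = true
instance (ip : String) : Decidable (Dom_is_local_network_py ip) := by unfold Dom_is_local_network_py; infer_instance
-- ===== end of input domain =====

-- B replaces A's ipaddress-object construction and any()-scan over five IPv4Network objects
-- by a hand parse of the dotted quad into one integer plus an OR of bit-mask prefix tests.

-- ===== PORT A =====
-- int(octet_str, 10) on an all-digit string
def pvDigitsVal (s : List Char) : Nat := s.foldl (fun acc c => acc * 10 + (c.toNat - 48)) 0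

-- Hand port of ipaddress.IPv4Address(str) construction (CPython _ip_int_from_string /
-- _parse_octet), returning the address integer; none = ValueError. Exact on the ASCII
-- domain: split on '.', exactly 4 octets, each 1-3 ASCII digits, no leading zeros, <= 255.
def pvOctetVal? (s : List Char) : Option Nat :=
  if s.isEmpty then none                      -- "Empty octet not permitted"
  else if !(s.all Char.isDigit) then none     -- "Only decimal digits permitted"
  else if s.length > 3 then none              -- "At most 3 characters permitted"
  else if s ≠ ['0'] ∧ s.head? = some '0' then none  -- "Leading zeros are not permitted"
  else if pvDigitsVal s > 255 then none       -- "Octet (> 255) not permitted"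
  else some (pvDigitsVal s)

def pvIPv4ToInt? (ip : String) : Option Nat :=
  match ip.toList.splitOn '.' with
  | [p1, p2, p3, p4] =>
    match pvOctetVal? p1, pvOctetVal? p2, pvOctetVal? p3, pvOctetVal? p4 with
    | some a, some b, some c, some d => some (((a * 256 + b) * 256 + c) * 256 + d)
    | _, _, _, _ => none
  | _ => none

-- A: build the five networks as (network_address, netmask) pairs and scan with any(...);
-- CPython's IPv4Network.__contains__ is `other._ip & self.netmask._ip == self.network_address._ip`.
def is_local_network_py (ip : String) : Bool :=
  match pvIPv4ToInt? ip with
  | none => false                              -- except Exception: return False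
  | some n =>
    let local_networks : List (Nat × Nat) :=
      [(0xC0A80000, 0xFFFF0000),   -- 192.168.0.0/16
       (0x0A000000, 0xFF000000),   -- 10.0.0.0/8
       (0xAC100000, 0xFFF00000),   -- 172.16.0.0/12
       (0xA9FE0000, 0xFFFF0000),   -- 169.254.0.0/16
       (0x7F000000, 0xFF000000)]   -- 127.0.0.0/8
    local_networks.any (fun network => n &&& network.2 == network.1)

-- ===== PORT B =====
-- B's for-loop over the four parts, accumulating n = n*256 + v; none = early `return False`.
def pvAltLoop : List (List Char) → Nat → Option Nat
  | [], n => some n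
  | p :: rest, n =>
    if p.isEmpty || !(p.all Char.isDigit) then none   -- not (p.isascii() and p.isdigit())
    else if p.length > 3 ∨ (p ≠ ['0'] ∧ p.head? = some '0') then none
    else if pvDigitsVal p > 255 then none             -- v = int(p); v > 255
    else pvAltLoop rest (n * 256 + pvDigitsVal p)

def is_local_network_py_alt (ip : String) : Bool :=
  let parts := ip.toList.splitOn '.'
  if parts.length ≠ 4 then false
  else
    match pvAltLoop parts 0 with
    | none => false
    | some n =>
      (n &&& 0xFFFF0000 == 0xC0A80000) ||
      (n >>> 24 == 10) ||
      (n &&& 0xFFF00000 == 0xAC100000) ||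
      (n &&& 0xFFFF0000 == 0xA9FE0000) ||
      (n >>> 24 == 127)

-- ===== PRECONDITION & SPEC =====
def Spec_is_local_network_py (ip : String) (out : Bool) : Prop := out = is_local_network_py_alt ip
instance (ip : String) (out : Bool) : Decidable (Spec_is_local_network_py ip out) := by unfold Spec_is_local_network_py; infer_instance

-- ===== CLAIM (what is proved, stated in full; the proofs are below) =====
def Claim_equal_is_local_network_py : Prop := ∀ (ip : String), Dom_is_local_network_py ip → Spec_is_local_network_py ip (is_local_network_py ip)

-- ===== LEMMAS AND PROOFS =====

theorem pvOctetVal_le (s : List Char) (v : Nat) (h : pvOctetVal? s = some v) : v ≤ 255 := by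
  unfold pvOctetVal? at h
  split_ifs at h
  simp_all

-- B's loop body performs exactly the checks of A's _parse_octet port
theorem pvAltLoop_step_none (p : List Char) (rest : List (List Char)) (n : Nat)
    (h : pvOctetVal? p = none) : pvAltLoop (p :: rest) n = none := by
  unfold pvOctetVal? at h
  simp only [pvAltLoop]
  split_ifs at h ⊢ <;> simp_all

theorem pvAltLoop_step_some (p : List Char) (rest : List (List Char)) (n v : Nat)
    (h : pvOctetVal? p = some v) : pvAltLoop (p :: rest) n = pvAltLoop rest (n * 256 + v) := by
  unfold pvOctetVal? at h
  simp only [pvAltLoop]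
  split_ifs at h ⊢ <;> simp_all

theorem pv_and_hi8 (n : Nat) : n &&& ((2^8 - 1) <<< 24) = ((n >>> 24) % 2^8) <<< 24 := by
  apply Nat.eq_of_testBit_eq; intro i
  simp only [Nat.testBit_and, Nat.testBit_shiftLeft, Nat.testBit_mod_two_pow,
    Nat.testBit_shiftRight, Nat.testBit_two_pow_sub_one]
  by_cases h : 24 ≤ i
  · have h' : 24 + (i - 24) = i := by omega
    simp [h, h']
    by_cases h2 : i - 24 < 8 <;> simp [h2]
  · simp [h]

theorem pv_hi8 (n X : Nat) (h : n < 4294967296) :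
    (n &&& 0xFF000000 == X * 16777216) = (n >>> 24 == X) := by
  have hq : n >>> 24 < 256 := by
    have := Nat.shiftRight_eq_div_pow n 24
    norm_num at this; omega
  have hm : n &&& 0xFF000000 = (n >>> 24) * 16777216 := by
    have h1 := pv_and_hi8 n
    norm_num [Nat.shiftLeft_eq, Nat.mod_eq_of_lt hq] at h1
    exact h1
  rw [hm, Bool.eq_iff_iff]
  simp only [beq_iff_eq]
  omega

-- ===== VERDICT (by name: the statement is the Claim_ definition above) =====
theorem is_local_network_py_spec : Claim_equal_is_local_network_py := by
  intro ip _
  unfold Spec_is_local_network_py is_local_network_py is_local_network_py_alt pvIPv4ToInt?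
  generalize ip.toList.splitOn '.' = parts
  rcases parts with _ | ⟨p1, _ | ⟨p2, _ | ⟨p3, _ | ⟨p4, _ | ⟨p5, rest⟩⟩⟩⟩⟩
  · rfl
  · rfl
  · rfl
  · rfl
  · rw [if_neg (by simp)]
    cases h1 : pvOctetVal? p1 with
    | none => rw [pvAltLoop_step_none _ _ _ h1]; simp [h1]
    | some a =>
    rw [pvAltLoop_step_some _ _ _ _ h1]
    cases h2 : pvOctetVal? p2 with
    | none => rw [pvAltLoop_step_none _ _ _ h2]; simp [h1, h2]
    | some b =>
    rw [pvAltLoop_step_some _ _ _ _ h2]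
    cases h3 : pvOctetVal? p3 with
    | none => rw [pvAltLoop_step_none _ _ _ h3]; simp [h1, h2, h3]
    | some c =>
    rw [pvAltLoop_step_some _ _ _ _ h3]
    cases h4 : pvOctetVal? p4 with
    | none => rw [pvAltLoop_step_none _ _ _ h4]; simp [h1, h2, h3, h4]
    | some d =>
    rw [pvAltLoop_step_some _ _ _ _ h4]
    have ha := pvOctetVal_le _ _ h1
    have hb := pvOctetVal_le _ _ h2
    have hc := pvOctetVal_le _ _ h3
    have hd := pvOctetVal_le _ _ h4
    have h32 : ((a * 256 + b) * 256 + c) * 256 + d < 4294967296 := by omega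
    simp only [h1, h2, h3, h4, pvAltLoop, Nat.zero_mul, Nat.zero_add, List.any_cons, List.any_nil,
      Bool.or_false]
    rw [show (0x0A000000 : Nat) = 10 * 16777216 by norm_num,
        show (0x7F000000 : Nat) = 127 * 16777216 by norm_num,
        pv_hi8 _ 10 h32, pv_hi8 _ 127 h32]
    simp only [Bool.or_assoc]
  · rw [if_pos (by simp only [List.length_cons]; omega)]
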